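-- pv_equiv track=rewrite | github.com/9b2n/coding-test | 프로그래머스/0단계/옹알이1.py | solution
-- ===== SOURCE A (Python) =====
-- def solution(babbling):
--     answer = 0
--     for word in babbling:
--         possible = ["aya", "ye", "woo", "ma"]
--         while possible:
--             start = len(possible)
--             for p in possible:
--                 if word.startswith(p):
--                     possible.pop(possible.index(p))
--                     if len(word) == len(p):
--                         word = ''
--                     else:
--                         word = word[len(p):]
--
--             if start == len(possible):
--                 break
--
--             if len(word) == 0:
--                 answer += 1
--                 break
--
--     return answer
-- ===== SOURCE B (Python) =====
-- def _phrases(tokens):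
--     # every concatenation of a nonempty sequence of distinct tokens from `tokens`
--     if not tokens:
--         return []
--     res = []
--     for k in range(len(tokens)):
--         t = tokens[k]
--         res.append(t)
--         for p in _phrases(tokens[:k] + tokens[k + 1:]):
--             res.append(t + p)
--     return res
--
--
-- def solution(babbling):
--     # The babbling language is finite (64 words): precompute it once and count by set membership.
--     valid = set(_phrases(["aya", "ye", "woo", "ma"]))
--     return sum(1 for word in babbling if word in valid)
-- ===== Notes on version B (the rewrite author's own statement) =====
-- stated objective: alternative
-- what changed: A parses each word by repeated destructive passes over a shrinking token list (popping while iterating); B never parses at all: it precomputes the finite babbling language (the 64 concatenations of nonempty sequences of distinct tokens) once and counts words by set membership.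
import Mathlib
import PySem

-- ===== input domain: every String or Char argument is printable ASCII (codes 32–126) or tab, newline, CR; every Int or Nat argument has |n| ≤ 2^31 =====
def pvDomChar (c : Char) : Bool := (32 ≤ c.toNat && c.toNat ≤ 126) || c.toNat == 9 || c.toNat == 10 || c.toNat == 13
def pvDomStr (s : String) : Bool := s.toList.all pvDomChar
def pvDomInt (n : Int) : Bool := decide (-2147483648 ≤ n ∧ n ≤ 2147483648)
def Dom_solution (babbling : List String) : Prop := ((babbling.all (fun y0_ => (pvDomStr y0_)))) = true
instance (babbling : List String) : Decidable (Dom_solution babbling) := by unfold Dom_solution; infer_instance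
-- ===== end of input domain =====

-- A parses each word by repeated destructive passes over a shrinking token list; B instead
-- precomputes the finite babbling language (64 words) once and counts by set membership:
-- objective 'alternative'.

-- ===== PORT A =====
-- A's inner `for p in possible:` mutates `possible` while iterating; CPython iterates by an
-- internal index, so the port carries that index i explicitly (p = possible[i] is inlined).
-- `possible.pop(possible.index(p))` is ported via PySem.List.index? (the `.getD 0` is
-- unreachable: p = avail[i] ∈ avail, so index? is some).
def solPass (w : List Char) (avail : List (List Char)) (i : Nat) : List Char × List (List Char) :=
  if h : i < avail.length then
    if PySem.Chars.startswith w avail[i] then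
      solPass
        (if w.length == avail[i].length then [] else PySem.List.slice w (some ((avail[i].length : Int))) none)
        (avail.eraseIdx ((PySem.List.index? avail avail[i]).getD 0)) (i+1)
    else solPass w avail (i+1)
  else (w, avail)
termination_by avail.length - i
decreasing_by
  · have := List.length_eraseIdx_le avail ((PySem.List.index? avail avail[i]).getD 0)
    omega
  · omega

-- A's `while possible:` loop; each continued pass strictly shrinks `possible` (length ≤ 4),
-- so fuel 5 is never exhausted (loop_spec below proves what it computes).
def solLoop : Nat → List Char → List (List Char) → Bool
  | 0, _, _ => false
  | fuel+1, w, avail =>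
    if avail.isEmpty then false
    else if (solPass w avail 0).2.length == avail.length then false
    else if (solPass w avail 0).1.length == 0 then true
    else solLoop fuel (solPass w avail 0).1 (solPass w avail 0).2

def solution (babbling : List String) : Int :=
  babbling.foldl (fun answer word =>
    if solLoop 5 word.toList [['a','y','a'], ['y','e'], ['w','o','o'], ['m','a']] then answer + 1
    else answer) 0

-- ===== PORT B =====
def pvTok : List (List Char) := [['a','y','a'], ['y','e'], ['w','o','o'], ['m','a']]

-- Source B's _phrases: every concatenation of a nonempty sequence of distinct tokens.
-- `tokens[k]` with k < len(tokens) is ported as getD (default unreachable);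
-- `tokens[:k] + tokens[k+1:]` via PySem.List.slice (exact).
def phrases (tokens : List (List Char)) : List (List Char) :=
  if tokens.isEmpty then []
  else (List.range tokens.length).attach.foldl
    (fun res kh =>
      (res ++ [tokens.getD kh.1 []]) ++
        (phrases (PySem.List.slice tokens none (some (kh.1 : Int)) ++
                  PySem.List.slice tokens (some ((kh.1 : Int) + 1)) none)).map
          (fun p => tokens.getD kh.1 [] ++ p))
    []
termination_by tokens.length
decreasing_by
  have hk : kh.1 < tokens.length := List.mem_range.mp kh.2
  have h1 : ((kh.1 : Int) + 1) = ((kh.1 + 1 : Nat) : Int) := by push_cast; ring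
  rw [PySem.List.slice_to_natCast, h1, PySem.List.slice_from_natCast]
  simp only [List.length_append, List.length_take, List.length_drop]
  omega

-- Source B's `valid = set(_phrases(...))`
def validTok : PySem.Set (List Char) := PySem.Set.ofList (phrases pvTok)

def solution_alt (babbling : List String) : Int :=
  (babbling.map (fun word => if validTok.contains word.toList then (1 : Int) else 0)).sum

-- ===== PRECONDITION & SPEC =====
def Spec_solution (babbling : List String) (out : Int) : Prop := out = solution_alt babbling
instance (babbling : List String) (out : Int) : Decidable (Spec_solution babbling out) := by unfold Spec_solution; infer_instance

-- ===== CLAIM (what is proved, stated in full; the proofs are below) =====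
def Claim_equal_solution : Prop := ∀ (babbling : List String), Dom_solution babbling → Spec_solution babbling (solution babbling)

-- ===== LEMMAS AND PROOFS =====

-- The common semantics: repeatedly strip the unique available token prefixing w.
def greedy (w : List Char) (avail : List (List Char)) : List Char × List (List Char) :=
  match _h : avail.find? (fun p => PySem.Chars.startswith w p) with
  | some p => greedy (w.drop p.length) (avail.erase p)
  | none => (w, avail)
termination_by avail.length
decreasing_by
  have hm := List.mem_of_find?_eq_some _h
  have h1 := List.length_erase_of_mem hm
  have h2 := List.length_pos_of_mem hm
  omega

theorem tok_ne_nil {p : List Char} (hp : p ∈ pvTok) : p ≠ [] := by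
  simp only [pvTok, List.mem_cons, List.not_mem_nil, or_false] at hp
  rcases hp with rfl | rfl | rfl | rfl <;> simp

theorem startswith_head {w p : List Char} (h : PySem.Chars.startswith w p = true) (hp : p ≠ []) :
    w.head? = p.head? := by
  obtain ⟨r, rfl⟩ := (PySem.Chars.startswith_iff w p).mp h
  cases p with
  | nil => exact absurd rfl hp
  | cons a l => rfl

theorem startswith_nil {p : List Char} (h : PySem.Chars.startswith [] p = true) : p = [] := by
  obtain ⟨r, hr⟩ := (PySem.Chars.startswith_iff [] p).mp h
  exact (List.append_eq_nil_iff.mp hr).1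

theorem uniq_match {avail : List (List Char)} (hs : List.Sublist avail pvTok) {w p q : List Char}
    (hp : p ∈ avail) (hq : q ∈ avail)
    (hwp : PySem.Chars.startswith w p = true) (hwq : PySem.Chars.startswith w q = true) : p = q := by
  have hp2 := hs.subset hp
  have hq2 := hs.subset hq
  simp only [pvTok, List.mem_cons, List.not_mem_nil, or_false] at hp2 hq2
  rcases hp2 with rfl | rfl | rfl | rfl <;> rcases hq2 with rfl | rfl | rfl | rfl <;>
    first
      | rfl
      | (have h1 := startswith_head hwp (by simp)
         have h2 := startswith_head hwq (by simp)
         rw [h1] at h2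
         simp at h2)

theorem find?_unique {α : Type} {l : List α} {t : α} {p : α → Bool} (ht : t ∈ l)
    (hpt : p t = true) (hu : ∀ x ∈ l, p x = true → x = t) : l.find? p = some t := by
  induction l with
  | nil => exact absurd ht List.not_mem_nil
  | cons a l ih =>
    by_cases ha : p a = true
    · have := hu a List.mem_cons_self ha
      subst this
      simp [List.find?, ha]
    · have hta : t ≠ a := fun h => ha (h ▸ hpt)
      have ht' : t ∈ l := by
        rcases List.mem_cons.mp ht with h | h
        · exact absurd h hta
        · exact h
      simp only [List.find?]
      rw [Bool.eq_false_iff.mpr ha]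
      exact ih ht' (fun x hx hpx => hu x (List.mem_cons_of_mem a hx) hpx)

theorem greedy_of_some {w : List Char} {avail : List (List Char)} {p : List Char}
    (h : avail.find? (fun p => PySem.Chars.startswith w p) = some p) :
    greedy w avail = greedy (w.drop p.length) (avail.erase p) := by
  rw [greedy.eq_def]
  split
  · next q heq => rw [h] at heq; injection heq with heq; subst heq; rfl
  · next heq => rw [h] at heq; exact absurd heq (by simp)

theorem greedy_of_none {w : List Char} {avail : List (List Char)}
    (h : avail.find? (fun p => PySem.Chars.startswith w p) = none) :
    greedy w avail = (w, avail) := by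
  rw [greedy.eq_def]
  split
  · next q heq => rw [h] at heq; exact absurd heq (by simp)
  · rfl

theorem greedy_step {avail : List (List Char)} (hs : List.Sublist avail pvTok) {w p : List Char}
    (hp : p ∈ avail) (hw : PySem.Chars.startswith w p = true) :
    greedy w avail = greedy (w.drop p.length) (avail.erase p) := by
  apply greedy_of_some
  exact find?_unique hp hw (fun x hx hpx => uniq_match hs hx hp hpx hw)

theorem greedy_no_match {w : List Char} {avail : List (List Char)}
    (h : ∀ p ∈ avail, PySem.Chars.startswith w p = false) : greedy w avail = (w, avail) := by
  apply greedy_of_none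
  rw [List.find?_eq_none]
  intro x hx
  simp [h x hx]

theorem greedy_empty {avail : List (List Char)} (hs : List.Sublist avail pvTok) :
    greedy [] avail = ([], avail) := by
  apply greedy_no_match
  intro p hp
  by_contra h
  exact tok_ne_nil (hs.subset hp) (startswith_nil (by simpa using h))

theorem index?_getElem {l : List (List Char)} (hnd : l.Nodup) {k : Nat} (hk : k < l.length) :
    PySem.List.index? l l[k] = some k := by
  rw [PySem.List.index?_eq_some_iff]
  refine ⟨l.take k, l.drop (k+1), ?_, ?_, ?_⟩
  · conv_lhs => rw [← List.take_append_drop k l]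
    rw [← List.getElem_cons_drop]
  · simp [List.length_take]; omega
  · intro hmem
    obtain ⟨j, hj, hjeq⟩ := List.mem_take_iff_getElem.mp hmem
    have : j = k := (List.Nodup.getElem_inj_iff hnd).mp hjeq
    omega

theorem erase_getElem_eq_eraseIdx {l : List (List Char)} (hnd : l.Nodup) {k : Nat}
    (hk : k < l.length) : l.erase l[k] = l.eraseIdx k := by
  have h1 : List.idxOf? l[k] l = some k := by
    rw [← PySem.List.index?_eq_idxOf?]
    exact index?_getElem hnd hk
  rw [List.erase_eq_eraseIdx, h1]

theorem pvTok_nodup : pvTok.Nodup := by decide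

theorem strip_eq {w p : List Char} (hw : PySem.Chars.startswith w p = true) :
    (if w.length == p.length then ([] : List Char)
     else PySem.List.slice w (some (p.length : Int)) none) = w.drop p.length := by
  have hpre := (PySem.Chars.startswith_iff w p).mp hw
  by_cases h : w.length = p.length
  · have : p = w := hpre.eq_of_length (by omega)
    subst this
    simp
  · simp only [beq_iff_eq, h, if_false]
    exact PySem.List.slice_from_natCast w p.length

-- "no available token at index ≥ i prefixes w"
def noMatchFrom (w : List Char) (avail : List (List Char)) (i : Nat) : Prop :=
  ∀ j, i ≤ j → ∀ (hj : j < avail.length), PySem.Chars.startswith w avail[j] = false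

theorem pass_spec : ∀ (w : List Char) (avail : List (List Char)) (i : Nat),
    List.Sublist avail pvTok →
    (greedy (solPass w avail i).1 (solPass w avail i).2 = greedy w avail
     ∧ List.Sublist (solPass w avail i).2 avail
     ∧ ((solPass w avail i).2.length = avail.length →
          solPass w avail i = (w, avail) ∧ noMatchFrom w avail i)
     ∧ (noMatchFrom w avail i → solPass w avail i = (w, avail))) := by
  intro w avail i
  induction w, avail, i using solPass.induct with
  | case1 w avail i h hsw ih =>
    intro hs
    have hnd : avail.Nodup := hs.nodup pvTok_nodup
    have hidx : (PySem.List.index? avail avail[i]).getD 0 = i := by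
      rw [index?_getElem hnd h]; rfl
    simp only [dite_eq_ite] at ih
    rw [hidx, strip_eq hsw] at ih
    have heq : solPass w avail i =
        solPass (w.drop avail[i].length) (avail.eraseIdx i) (i+1) := by
      rw [solPass]
      rw [dif_pos h, if_pos hsw, hidx, strip_eq hsw]
    have hsub : List.Sublist (avail.eraseIdx i) avail := List.eraseIdx_sublist avail i
    have ih' := ih (hsub.trans hs)
    have hlen : (avail.eraseIdx i).length = avail.length - 1 := by
      rw [List.length_eraseIdx]; simp [h]
    have hgr : greedy w avail =
        greedy (w.drop avail[i].length) (avail.eraseIdx i) := by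
      rw [greedy_step hs (List.getElem_mem h) hsw,
          erase_getElem_eq_eraseIdx hnd h]
    refine ⟨?_, ?_, ?_, ?_⟩
    · rw [heq, hgr]
      exact ih'.1
    · rw [heq]
      exact (ih'.2.1.trans hsub)
    · intro hle
      exfalso
      rw [heq] at hle
      have h2 := List.Sublist.length_le ih'.2.1
      omega
    · intro hnm
      exact absurd (hnm i le_rfl h) (by simp [hsw])
  | case2 w avail i h hsw ih =>
    intro hs
    have heq : solPass w avail i = solPass w avail (i+1) := by
      rw [solPass]
      rw [dif_pos h, if_neg (by simp [hsw])]
    have ih' := ih hs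
    refine ⟨?_, ?_, ?_, ?_⟩
    · rw [heq]; exact ih'.1
    · rw [heq]; exact ih'.2.1
    · intro hle
      rw [heq] at hle ⊢
      obtain ⟨h1, h2⟩ := ih'.2.2.1 hle
      refine ⟨h1, ?_⟩
      intro j hij hj
      rcases Nat.eq_or_lt_of_le hij with hji | hji
      · subst hji; simpa using hsw
      · exact h2 j hji hj
    · intro hnm
      rw [heq]
      exact ih'.2.2.2 (fun j hij hj => hnm j (by omega) hj)
  | case3 w avail i h =>
    intro hs
    have heq : solPass w avail i = (w, avail) := by
      rw [solPass, dif_neg h]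
    refine ⟨by rw [heq], by rw [heq], ?_, fun _ => heq⟩
    intro _
    exact ⟨heq, fun j hij hj => absurd hj (by omega)⟩

theorem noMatch_of_noMatchFrom {w : List Char} {avail : List (List Char)}
    (h : noMatchFrom w avail 0) : ∀ p ∈ avail, PySem.Chars.startswith w p = false := by
  intro p hp
  obtain ⟨k, hk, rfl⟩ := List.getElem_of_mem hp
  exact h k (Nat.zero_le k) hk

theorem startswith_nil_false {avail : List (List Char)} (hs : List.Sublist avail pvTok) :
    noMatchFrom [] avail 0 := by
  intro j _ hj
  by_contra hc
  exact tok_ne_nil (hs.subset (List.getElem_mem hj))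
    (startswith_nil (by simpa using hc))

theorem loop_spec : ∀ (fuel : Nat) (w : List Char) (avail : List (List Char)),
    List.Sublist avail pvTok → avail.length < fuel →
    solLoop fuel w avail = (!w.isEmpty && decide ((greedy w avail).1 = [])) := by
  intro fuel
  induction fuel with
  | zero => intro w avail _ hlt; omega
  | succ fuel ih =>
    intro w avail hs hlt
    by_cases hw : w = []
    · subst hw
      rw [solLoop]
      by_cases ha : avail.isEmpty
      · simp [ha]
      · have hst := (pass_spec [] avail 0 hs).2.2.2 (startswith_nil_false hs)
        simp [ha, hst]
    · have hwb : (!w.isEmpty) = true := by cases w <;> simp_all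
      rw [solLoop]
      by_cases ha : avail.isEmpty
      · have : avail = [] := List.isEmpty_iff.mp ha
        subst this
        have : greedy w [] = (w, []) := greedy_of_none rfl
        simp [ha, this, hw]
      · rw [if_neg (by simp [ha])]
        have hps := pass_spec w avail 0 hs
        by_cases hlen : (solPass w avail 0).2.length = avail.length
        · have hgr : greedy w avail = (w, avail) :=
            greedy_no_match (noMatch_of_noMatchFrom (hps.2.2.1 hlen).2)
          simp [hlen, hgr, hw]
        · rw [if_neg (by simpa using hlen)]
          have hlt2 : (solPass w avail 0).2.length < avail.length :=
            lt_of_le_of_ne (List.Sublist.length_le hps.2.1) hlen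
          have hs2 : List.Sublist (solPass w avail 0).2 pvTok := hps.2.1.trans hs
          by_cases h1 : (solPass w avail 0).1 = []
          · have hgr : (greedy w avail).1 = [] := by
              rw [← hps.1, h1, greedy_empty hs2]
            simp [h1, hgr, hwb]
          · rw [if_neg (by simpa using h1)]
            rw [ih (solPass w avail 0).1 (solPass w avail 0).2 hs2 (by omega)]
            have h1b : (!(solPass w avail 0).1.isEmpty) = true := by
              cases hh : (solPass w avail 0).1 <;> simp_all
            rw [h1b, Bool.true_and, hwb, Bool.true_and, hps.1]

theorem mem_phrases (tokens : List (List Char)) (w : List Char) :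
    w ∈ phrases tokens ↔ ∃ k, ∃ (hk : k < tokens.length),
      (w = tokens[k] ∨ ∃ p ∈ phrases (tokens.eraseIdx k), w = tokens[k] ++ p) := by
  rw [phrases]
  by_cases he : tokens.isEmpty
  · have : tokens = [] := List.isEmpty_iff.mp he
    subst this
    simp
  · rw [if_neg he]
    simp only [List.append_assoc]
    rw [PySem.List.foldl_append_eq_flatMap]
    simp only [List.nil_append, List.mem_flatMap, List.mem_attach, true_and]
    constructor
    · rintro ⟨⟨k, hkmem⟩, hmem⟩
      have hk : k < tokens.length := List.mem_range.mp hkmem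
      have h1 : ((k : Int) + 1) = ((k + 1 : Nat) : Int) := by push_cast; ring
      rw [PySem.List.slice_to_natCast, h1, PySem.List.slice_from_natCast,
          ← List.eraseIdx_eq_take_drop_succ, List.getD_eq_getElem tokens [] hk] at hmem
      simp only [List.singleton_append, List.mem_cons, List.mem_map] at hmem
      refine ⟨k, hk, ?_⟩
      rcases hmem with h | ⟨p, hp, hpe⟩
      · exact Or.inl h
      · exact Or.inr ⟨p, hp, hpe.symm⟩
    · rintro ⟨k, hk, hcase⟩
      refine ⟨⟨k, List.mem_range.mpr hk⟩, ?_⟩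
      have h1 : ((k : Int) + 1) = ((k + 1 : Nat) : Int) := by push_cast; ring
      rw [PySem.List.slice_to_natCast, h1, PySem.List.slice_from_natCast,
          ← List.eraseIdx_eq_take_drop_succ, List.getD_eq_getElem tokens [] hk]
      simp only [List.singleton_append, List.mem_cons, List.mem_map]
      rcases hcase with h | ⟨p, hp, hpe⟩
      · exact Or.inl h
      · exact Or.inr ⟨p, hp, hpe.symm⟩

theorem phrases_iff_greedy : ∀ (n : Nat) (avail : List (List Char)), avail.length = n →
    List.Sublist avail pvTok → ∀ (w : List Char),
    (w ∈ phrases avail ↔ (w ≠ [] ∧ (greedy w avail).1 = [])) := by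
  intro n
  induction n using Nat.strong_induction_on with
  | _ n ih =>
    intro avail hlen hs w
    have hnd : avail.Nodup := hs.nodup pvTok_nodup
    constructor
    · intro hmem
      obtain ⟨k, hk, hcase⟩ := (mem_phrases avail w).mp hmem
      have htmem : avail[k] ∈ avail := List.getElem_mem hk
      have htok : avail[k] ∈ pvTok := hs.subset htmem
      have htne : avail[k] ≠ [] := tok_ne_nil htok
      have hesub : List.Sublist (avail.eraseIdx k) avail := List.eraseIdx_sublist avail k
      have helen : (avail.eraseIdx k).length = avail.length - 1 := by
        rw [List.length_eraseIdx]; simp [hk]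
      rcases hcase with rfl | ⟨p, hp, rfl⟩
      · refine ⟨htne, ?_⟩
        have hsw : PySem.Chars.startswith avail[k] avail[k] = true :=
          (PySem.Chars.startswith_iff _ _).mpr ⟨[], List.append_nil _⟩
        rw [greedy_step hs htmem hsw, erase_getElem_eq_eraseIdx hnd hk]
        have : avail[k].drop avail[k].length = [] := by simp
        rw [this, greedy_empty (hesub.trans hs)]
      · have hrec := ih (avail.length - 1) (by omega) (avail.eraseIdx k) helen
          (hesub.trans hs) p
        obtain ⟨hpne, hpg⟩ := hrec.mp hp
        refine ⟨by simp [htne], ?_⟩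
        have hsw : PySem.Chars.startswith (avail[k] ++ p) avail[k] = true :=
          (PySem.Chars.startswith_iff _ _).mpr ⟨p, rfl⟩
        rw [greedy_step hs htmem hsw, erase_getElem_eq_eraseIdx hnd hk,
            List.drop_left]
        exact hpg
    · rintro ⟨hw, hg⟩
      rcases hfind : avail.find? (fun p => PySem.Chars.startswith w p) with _ | t
      · rw [greedy_of_none hfind] at hg
        exact absurd hg hw
      · have htmem : t ∈ avail := List.mem_of_find?_eq_some hfind
        have hsw : PySem.Chars.startswith w t = true := List.find?_some hfind
        obtain ⟨r, rfl⟩ := (PySem.Chars.startswith_iff w t).mp hsw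
        obtain ⟨k, hk, hke⟩ := List.getElem_of_mem htmem
        rw [greedy_of_some hfind, List.drop_left] at hg
        have herase : avail.erase t = avail.eraseIdx k := by
          rw [← hke]; exact erase_getElem_eq_eraseIdx hnd hk
        rw [herase] at hg
        have hesub : List.Sublist (avail.eraseIdx k) avail := List.eraseIdx_sublist avail k
        have helen : (avail.eraseIdx k).length = avail.length - 1 := by
          rw [List.length_eraseIdx]; simp [hk]
        have hkpos : 0 < avail.length := by omega
        rcases hr : r with _ | ⟨c, cs⟩
        · subst hr
          refine (mem_phrases avail (t ++ [])).mpr ⟨k, hk, Or.inl ?_⟩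
          simp [hke]
        · have hrne : r ≠ [] := by rw [hr]; simp
          rw [← hr] at *
          have hrec := ih (avail.length - 1) (by omega) (avail.eraseIdx k) helen
            (hesub.trans hs) r
          have hrmem : r ∈ phrases (avail.eraseIdx k) := hrec.mpr ⟨hrne, hg⟩
          exact (mem_phrases avail (t ++ r)).mpr ⟨k, hk, Or.inr ⟨r, hrmem, by rw [hke]⟩⟩

theorem perword (w : List Char) :
    solLoop 5 w [['a','y','a'], ['y','e'], ['w','o','o'], ['m','a']] = validTok.contains w := by
  have h1 : solLoop 5 w pvTok = (!w.isEmpty && decide ((greedy w pvTok).1 = [])) :=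
    loop_spec 5 w pvTok (List.Sublist.refl _) (by decide)
  rw [show [['a','y','a'], ['y','e'], ['w','o','o'], ['m','a']] = pvTok from rfl, h1]
  rw [Bool.eq_iff_iff]
  constructor
  · intro h
    simp only [Bool.and_eq_true, Bool.not_eq_true', decide_eq_true_eq] at h
    have hw : w ≠ [] := by
      intro hh; subst hh; simp at h
    have hmem : w ∈ phrases pvTok :=
      (phrases_iff_greedy pvTok.length pvTok rfl (List.Sublist.refl _) w).mpr ⟨hw, h.2⟩
    rw [PySem.Set.contains_iff]
    exact (PySem.Set.mem_ofList _ _).mpr hmem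
  · intro h
    have hmem : w ∈ phrases pvTok :=
      (PySem.Set.mem_ofList _ _).mp ((PySem.Set.contains_iff _ _).mp h)
    obtain ⟨hw, hg⟩ :=
      (phrases_iff_greedy pvTok.length pvTok rfl (List.Sublist.refl _) w).mp hmem
    simp only [Bool.and_eq_true, Bool.not_eq_true', decide_eq_true_eq]
    exact ⟨by cases w <;> simp_all, hg⟩

theorem foldl_if_count (c : String → Bool) (l : List String) : ∀ (init : Int),
    l.foldl (fun a w => if c w then a + 1 else a) init
      = init + (l.map (fun w => if c w then (1 : Int) else 0)).sum := by
  induction l with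
  | nil => intro init; simp
  | cons x xs ih =>
    intro init
    simp only [List.foldl_cons, List.map_cons, List.sum_cons]
    rw [ih]
    by_cases h : c x
    · simp only [if_pos h]
      ring
    · simp only [if_neg h]
      ring

-- ===== VERDICT (by name: the statement is the Claim_ definition above) =====
theorem solution_spec : Claim_equal_solution := by
  intro babbling _
  unfold Spec_solution solution solution_alt
  have hfun : (fun (answer : Int) (word : String) =>
      if solLoop 5 word.toList [['a','y','a'], ['y','e'], ['w','o','o'], ['m','a']] then answer + 1
      else answer)
    = (fun (answer : Int) (word : String) =>
      if validTok.contains word.toList then answer + 1 else answer) := by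
    funext a word
    rw [perword word.toList]
  rw [hfun, foldl_if_count (fun word => validTok.contains word.toList) babbling 0, zero_add]
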